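-- pv_equiv track=rewrite | github.com/srankur/ProgPrep | Leet/Easy/Array/BuySellStock.py | maxProfit_non_valleypeak
-- ===== SOURCE A (Python) =====
-- def maxProfit_non_valleypeak(arr):
--     profit = 0
--     j = 0
--     length= len (arr)
--     for i in range(length):
--         j = i + 1 # Keep the j, one pointer ahead of i
--         if j < length and arr[i] > arr[j]:
--             continue
--
--         if j < length and arr[i] < arr[j]:
--             while j < length-1  and arr[j] < arr[j+1]:
--                 j += 1
--             profit += (arr[j] - arr[i])
--             i = j
--
--     return profit
-- ===== SOURCE B (Python) =====
-- def maxProfit_non_valleypeak(arr):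
--     # Single right-to-left pass: p carries the peak value of the increasing
--     # run starting at the current position, so the inner rescan disappears.
--     n = len(arr)
--     profit = 0
--     p = 0
--     for i in range(n - 1, -1, -1):
--         if i == n - 1:
--             p = arr[i]
--         elif arr[i] < arr[i + 1]:
--             profit += p - arr[i]
--         else:
--             p = arr[i]
--     return profit
-- ===== Notes on version B (the rewrite author's own statement) =====
-- stated objective: faster
-- what changed: Replaced A's per-index inner while-loop rescan to the run's peak by a single right-to-left pass that carries the peak value of the increasing run starting at the current position.
import Mathlib
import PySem

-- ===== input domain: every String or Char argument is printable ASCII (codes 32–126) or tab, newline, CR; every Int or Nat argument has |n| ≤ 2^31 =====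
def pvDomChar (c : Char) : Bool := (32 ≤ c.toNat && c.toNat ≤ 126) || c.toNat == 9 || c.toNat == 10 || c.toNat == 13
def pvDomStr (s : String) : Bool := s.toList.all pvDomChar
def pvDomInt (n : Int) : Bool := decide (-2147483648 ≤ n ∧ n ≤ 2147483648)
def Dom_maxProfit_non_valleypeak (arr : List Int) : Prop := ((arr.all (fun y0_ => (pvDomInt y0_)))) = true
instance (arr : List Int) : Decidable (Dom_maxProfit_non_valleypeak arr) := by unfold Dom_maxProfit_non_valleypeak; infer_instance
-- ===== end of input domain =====

-- B replaces A's per-index inner rescan to the run's peak by one right-to-left pass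
-- carrying the current peak value (O(n) instead of O(n^2)); same return value everywhere.

-- ===== PORT A =====
-- the inner `while j < length-1 and arr[j] < arr[j+1]: j += 1` loop
-- (all list accesses are in range, so getD's default 0 is never used; exact there)
def pvWhileAdv (arr : List Int) (j : Nat) : Nat :=
  if j < arr.length - 1 ∧ arr.getD j 0 < arr.getD (j + 1) 0 then
    pvWhileAdv arr (j + 1)
  else j
termination_by arr.length - j
decreasing_by omega

def maxProfit_non_valleypeak (arr : List Int) : Int :=
  let length := arr.length
  (List.range length).foldl
    (fun profit i =>
      let j := i + 1
      if j < length ∧ arr.getD i 0 > arr.getD j 0 then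
        profit   -- continue
      else if j < length ∧ arr.getD i 0 < arr.getD j 0 then
        let j' := pvWhileAdv arr j
        profit + (arr.getD j' 0 - arr.getD i 0)   -- `i = j` in A has no effect on a Python for-loop
      else profit)
    0

-- ===== PORT B =====
-- right-to-left scan; state = (profit so far, peak value of the increasing run starting here)
def pvGoB : Int → List Int → Int × Int
  | x, [] => (0, x)
  | x, y :: r =>
      let sp := pvGoB y r
      (sp.1 + (if x < y then sp.2 - x else 0), if x < y then sp.2 else x)

def maxProfit_non_valleypeak_alt (arr : List Int) : Int :=
  match arr with
  | [] => 0
  | x :: r => (pvGoB x r).1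

-- ===== PRECONDITION & SPEC =====
def Spec_maxProfit_non_valleypeak (arr : List Int) (out : Int) : Prop := out = maxProfit_non_valleypeak_alt arr
instance (arr : List Int) (out : Int) : Decidable (Spec_maxProfit_non_valleypeak arr out) := by unfold Spec_maxProfit_non_valleypeak; infer_instance

-- ===== CLAIM (what is proved, stated in full; the proofs are below) =====
def Claim_equal_maxProfit_non_valleypeak : Prop := ∀ (arr : List Int), Dom_maxProfit_non_valleypeak arr → Spec_maxProfit_non_valleypeak arr (maxProfit_non_valleypeak arr)

-- ===== LEMMAS AND PROOFS =====

-- contribution of loop index i in A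
def pvC (arr : List Int) (i : Nat) : Int :=
  if i + 1 < arr.length ∧ arr.getD i 0 < arr.getD (i + 1) 0 then
    arr.getD (pvWhileAdv arr (i + 1)) 0 - arr.getD i 0
  else 0

lemma pvWhileAdv_shift (x : Int) (arr : List Int) (j : Nat) :
    pvWhileAdv (x :: arr) (j + 1) = pvWhileAdv arr j + 1 := by
  induction h : arr.length - j generalizing j with
  | zero =>
      conv_lhs => rw [pvWhileAdv]
      conv_rhs => rw [pvWhileAdv]
      simp only [List.length_cons, List.getD_cons_succ, Nat.add_sub_cancel]
      rw [if_neg (by intro hh; exact absurd hh.1 (by omega)),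
          if_neg (by intro hh; exact absurd hh.1 (by omega))]
  | succ n ih =>
      conv_lhs => rw [pvWhileAdv]
      conv_rhs => rw [pvWhileAdv]
      simp only [List.length_cons, List.getD_cons_succ, Nat.add_sub_cancel]
      by_cases hc : j < arr.length - 1 ∧ arr.getD j 0 < arr.getD (j + 1) 0
      · rw [if_pos ⟨by omega, hc.2⟩, if_pos hc]
        exact ih (j + 1) (by omega)
      · rw [if_neg (by intro hh; exact hc ⟨by omega, hh.2⟩), if_neg hc]

lemma pvC_shift (x : Int) (arr : List Int) (i : Nat) :
    pvC (x :: arr) (i + 1) = pvC arr i := by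
  unfold pvC
  simp only [List.length_cons, List.getD_cons_succ, pvWhileAdv_shift]
  by_cases hc : i + 1 < arr.length ∧ arr.getD i 0 < arr.getD (i + 1) 0
  · rw [if_pos (by exact ⟨by omega, hc.2⟩), if_pos hc]
  · rw [if_neg (by intro hh; exact hc ⟨by omega, hh.2⟩), if_neg hc]

-- A's fold accumulates exactly the pvC contributions
lemma pvFold_eq (arr : List Int) (l : List Nat) (s : Int) :
    l.foldl
      (fun profit i =>
        let j := i + 1
        if j < arr.length ∧ arr.getD i 0 > arr.getD j 0 then profit
        else if j < arr.length ∧ arr.getD i 0 < arr.getD j 0 then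
          profit + (arr.getD (pvWhileAdv arr j) 0 - arr.getD i 0)
        else profit)
      s
    = s + (l.map (pvC arr)).sum := by
  induction l generalizing s with
  | nil => simp
  | cons i t ih =>
      simp only [List.foldl_cons, List.map_cons, List.sum_cons, ih]
      unfold pvC
      by_cases h1 : i + 1 < arr.length ∧ arr.getD i 0 > arr.getD (i + 1) 0
      · rw [if_pos h1, if_neg (by intro hh; omega)]; ring
      · rw [if_neg h1]
        by_cases h2 : i + 1 < arr.length ∧ arr.getD i 0 < arr.getD (i + 1) 0
        · rw [if_pos h2, if_pos h2]; ring
        · rw [if_neg h2, if_neg h2]; ring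

lemma pvA_eq_sum (arr : List Int) :
    maxProfit_non_valleypeak arr = ((List.range arr.length).map (pvC arr)).sum := by
  unfold maxProfit_non_valleypeak
  simpa using pvFold_eq arr (List.range arr.length) 0

-- the while loop's final value is B's carried peak
lemma pvWhileAdv_val (y : Int) (r : List Int) :
    (y :: r).getD (pvWhileAdv (y :: r) 0) 0 = (pvGoB y r).2 := by
  induction r generalizing y with
  | nil =>
      rw [pvWhileAdv]
      simp [pvGoB]
  | cons z r' ih =>
      rw [pvWhileAdv]
      simp only [List.length_cons, List.getD_cons_zero, List.getD_cons_succ,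
        Nat.add_sub_cancel]
      by_cases h : y < z
      · rw [if_pos ⟨by omega, by simpa using h⟩]
        rw [show (0 + 1 : Nat) = 0 + 1 from rfl, pvWhileAdv_shift]
        rw [List.getD_cons_succ, ih z]
        simp [pvGoB, h]
      · rw [if_neg (by intro hh; exact h (by simpa using hh.2))]
        simp [pvGoB, h]

lemma pvMain (arr : List Int) :
    ((List.range arr.length).map (pvC arr)).sum = maxProfit_non_valleypeak_alt arr := by
  induction arr with
  | nil => simp [maxProfit_non_valleypeak_alt]
  | cons x r ih =>
      simp only [List.length_cons, List.range_succ_eq_map, List.map_cons, List.map_map,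
        List.sum_cons]
      have hshift : (List.range r.length).map ((pvC (x :: r)) ∘ Nat.succ)
          = (List.range r.length).map (pvC r) := by
        apply List.map_congr_left
        intro i _
        simpa using pvC_shift x r i
      rw [hshift, ih]
      -- head contribution
      cases r with
      | nil => simp [pvC, maxProfit_non_valleypeak_alt, pvGoB]
      | cons y r' =>
          unfold pvC
          simp only [List.length_cons, List.getD_cons_zero, List.getD_cons_succ]
          rw [show (0 + 1 : Nat) = 0 + 1 from rfl, pvWhileAdv_shift, List.getD_cons_succ,
            pvWhileAdv_val]
          by_cases h : x < y
          · rw [if_pos ⟨by omega, h⟩]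
            simp [maxProfit_non_valleypeak_alt, pvGoB, h]
            ring
          · rw [if_neg (by intro hh; exact h hh.2)]
            simp [maxProfit_non_valleypeak_alt, pvGoB, h]

-- ===== VERDICT (by name: the statement is the Claim_ definition above) =====
theorem maxProfit_non_valleypeak_spec : Claim_equal_maxProfit_non_valleypeak := by
  intro arr _
  unfold Spec_maxProfit_non_valleypeak
  rw [pvA_eq_sum, pvMain]
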